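-- pv_equiv track=rewrite | github.com/sikso1892/miscellaneous-algorithm | 최소직사각형.py | solution
-- ===== SOURCE A (Python) =====
-- def solution(sizes):
--     answer = 0
--     w = h = 0
--
--     answer = w * h
--     for fst, snd in sizes:
--         if fst < snd:
--             fst, snd = snd, fst
--         if w < fst:
--             w = fst
--         if h < snd:
--             h = snd
--     answer = w * h
--
--     return answer
-- ===== SOURCE B (Python) =====
-- def solution(sizes):
--     ws = sorted([max(a, b) for a, b in sizes] + [0])
--     hs = sorted([min(a, b) for a, b in sizes] + [0])
--     return ws[-1] * hs[-1]
-- ===== Notes on version B (the rewrite author's own statement) =====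
-- stated objective: alternative
-- what changed: Replaces A's fused single-pass loop with in-place swap and running max accumulators by a sort-then-take-last strategy: sort the per-pair larger sides and the per-pair smaller sides (each with the 0 baseline A's accumulators start from) and multiply the last elements.
import Mathlib
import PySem

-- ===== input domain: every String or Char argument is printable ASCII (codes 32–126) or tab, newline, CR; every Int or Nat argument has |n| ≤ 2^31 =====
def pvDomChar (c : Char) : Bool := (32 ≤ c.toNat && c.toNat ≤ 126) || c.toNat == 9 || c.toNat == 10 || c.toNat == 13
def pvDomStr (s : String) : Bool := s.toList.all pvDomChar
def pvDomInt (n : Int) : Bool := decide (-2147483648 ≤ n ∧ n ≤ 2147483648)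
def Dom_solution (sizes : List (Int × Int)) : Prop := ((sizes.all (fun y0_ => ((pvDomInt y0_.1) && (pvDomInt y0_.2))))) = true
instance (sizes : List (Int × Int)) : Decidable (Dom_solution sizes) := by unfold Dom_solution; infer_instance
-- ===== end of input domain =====

-- B replaces A's fused single pass (in-place swap + running max accumulators) by
-- sort-then-take-last: sort the per-pair larger sides and the per-pair smaller
-- sides (each with the 0 baseline A's accumulators start from) and multiply the
-- last elements; objective: alternative (same result, different traversal).

-- ===== PORT A =====
-- literal transliteration of A's single loop over (w, h)
def solution (sizes : List (Int × Int)) : Int :=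
  let wh : Int × Int := sizes.foldl (fun wh p =>
    let fst := p.1
    let snd := p.2
    let fs : Int × Int := if fst < snd then (snd, fst) else (fst, snd)
    let w := if wh.1 < fs.1 then fs.1 else wh.1
    let h := if wh.2 < fs.2 then fs.2 else wh.2
    (w, h)) ((0 : Int), (0 : Int))
  wh.1 * wh.2

-- ===== PORT B =====
-- literal transliteration of Source B: Python sorted → PySem.List.sorted (identity key);
-- the sorted lists end with the appended 0 so they are nonempty and xs[-1]'s
-- default is never supplied (pyGetD with Raise.InRange holds).
def solution_alt (sizes : List (Int × Int)) : Int :=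
  let ws := PySem.List.sorted ((sizes.map (fun p => max p.1 p.2)) ++ [(0 : Int)]) (fun y => y) false
  let hs := PySem.List.sorted ((sizes.map (fun p => min p.1 p.2)) ++ [(0 : Int)]) (fun y => y) false
  (PySem.List.pyGetD ws (-1) 0) * (PySem.List.pyGetD hs (-1) 0)

-- ===== PRECONDITION & SPEC =====
def Spec_solution (sizes : List (Int × Int)) (out : Int) : Prop := out = solution_alt sizes
instance (sizes : List (Int × Int)) (out : Int) : Decidable (Spec_solution sizes out) := by unfold Spec_solution; infer_instance

-- ===== CLAIM (what is proved, stated in full; the proofs are below) =====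
def Claim_equal_solution : Prop := ∀ (sizes : List (Int × Int)), Dom_solution sizes → Spec_solution sizes (solution sizes)

-- ===== LEMMAS AND PROOFS =====

-- A's loop body computes componentwise maxima
theorem solution_foldl_eq (l : List (Int × Int)) (w h : Int) :
    l.foldl (fun wh p =>
      let fst := p.1
      let snd := p.2
      let fs : Int × Int := if fst < snd then (snd, fst) else (fst, snd)
      let w := if wh.1 < fs.1 then fs.1 else wh.1
      let h := if wh.2 < fs.2 then fs.2 else wh.2
      (w, h)) (w, h)
    = ((l.map (fun p => max p.1 p.2)).foldl max w,
       (l.map (fun p => min p.1 p.2)).foldl max h) := by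
  induction l generalizing w h with
  | nil => simp
  | cons x t ih =>
    have hx : ((fun (wh p : Int × Int) =>
        let fst := p.1
        let snd := p.2
        let fs : Int × Int := if fst < snd then (snd, fst) else (fst, snd)
        let w := if wh.1 < fs.1 then fs.1 else wh.1
        let h := if wh.2 < fs.2 then fs.2 else wh.2
        (w, h)) (w, h) x) = (max w (max x.1 x.2), max h (min x.1 x.2)) := by
      dsimp only
      split_ifs <;> simp only [Prod.mk.injEq, max_def, min_def] <;>
        split_ifs <;> constructor <;> omega
    dsimp only at hx
    simp only [List.foldl_cons, List.map_cons]
    rw [hx, ih]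

-- foldl max a is an element of a :: l
theorem foldl_max_mem (l : List Int) (a : Int) : l.foldl max a ∈ a :: l := by
  induction l generalizing a with
  | nil => simp
  | cons x t ih =>
    simp only [List.foldl_cons]
    have h := ih (max a x)
    rcases max_choice a x with hm | hm <;> rw [hm] at h ⊢ <;>
      rcases List.mem_cons.mp h with h' | h' <;> simp [h']

-- every element of a :: l is ≤ foldl max a l
theorem le_foldl_max' (l : List Int) (a : Int) : ∀ y ∈ a :: l, y ≤ l.foldl max a := by
  induction l generalizing a with
  | nil => simp
  | cons x t ih =>
    intro y hy
    simp only [List.foldl_cons]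
    rcases List.mem_cons.mp hy with rfl | hy
    · exact le_trans (le_max_left _ _) (List.forall_mem_cons.mp (ih (max y x))).1
    · rcases List.mem_cons.mp hy with rfl | hy
      · exact le_trans (le_max_right _ _) (List.forall_mem_cons.mp (ih (max a y))).1
      · exact (List.forall_mem_cons.mp (ih (max a x))).2 y hy

-- the last element of a pairwise-≤ list bounds every element
theorem getLast_ge_of_pairwise (l : List Int) (hp : l.Pairwise (· ≤ ·)) (h : l ≠ []) :
    ∀ y ∈ l, y ≤ l.getLast h := by
  induction l with
  | nil => simp at h
  | cons x t ih =>
    intro y hy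
    cases t with
    | nil => simp_all
    | cons z t' =>
      rcases List.mem_cons.mp hy with rfl | hy
      · have hx : y ≤ z := (List.pairwise_cons.mp hp).1 z (by simp)
        have := ih (List.pairwise_cons.mp hp).2 (by simp) z (by simp)
        rw [List.getLast_cons (by simp)]
        omega
      · rw [List.getLast_cons (by simp)]
        exact ih (List.pairwise_cons.mp hp).2 (by simp) y hy

-- Python (sorted(l + [0]))[-1] equals A's running max started at 0
theorem sorted_last_eq_foldl_max (l : List Int) :
    PySem.List.pyGetD (PySem.List.sorted (l ++ [(0 : Int)]) (fun y => y) false) (-1) 0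
      = l.foldl max 0 := by
  set s := PySem.List.sorted (l ++ [(0 : Int)]) (fun y => y) false with hs
  have hperm : s.Perm (l ++ [0]) := PySem.List.sorted_perm _ _ _
  have hne : s ≠ [] := by
    intro h
    have := hperm.length_eq
    simp [h] at this
  rw [PySem.List.pyGetD_neg_one (h := hne)]
  have hmem_iff : ∀ y : Int, y ∈ s ↔ y ∈ (0 : Int) :: l := by
    intro y
    rw [hperm.mem_iff]
    simp [List.mem_append, List.mem_cons, or_comm]
  -- the last element of s bounds all of 0 :: l, and foldl max 0 l bounds it back
  have hlast_mem : s.getLast hne ∈ (0 : Int) :: l :=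
    (hmem_iff _).mp (List.getLast_mem hne)
  have hfold_mem : l.foldl max 0 ∈ s := (hmem_iff _).mpr (foldl_max_mem l 0)
  have h1 : s.getLast hne ≤ l.foldl max 0 := le_foldl_max' l 0 _ hlast_mem
  have hpw : s.Pairwise (· ≤ ·) := by
    have := PySem.List.sorted_pairwise (xs := l ++ [(0 : Int)]) (key := fun y => y)
    simpa using this
  have h2 : l.foldl max 0 ≤ s.getLast hne :=
    getLast_ge_of_pairwise s hpw hne _ hfold_mem
  omega

-- ===== VERDICT (by name: the statement is the Claim_ definition above) =====
theorem solution_spec : Claim_equal_solution := by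
  intro sizes _
  unfold Spec_solution solution solution_alt
  dsimp only
  rw [solution_foldl_eq, sorted_last_eq_foldl_max, sorted_last_eq_foldl_max]
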